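-- pv_equiv track=rewrite | github.com/yin102570/detectgpt-pytorch- | utils/generate_data.py | truncate_to_substring
-- ===== SOURCE A (Python) =====
-- def truncate_to_substring(text, substring, idx_occurrence):
--     # 截断到substring第idx_occurrence次出现的位置
--     assert idx_occurrence > 0, 'idx_occurrence必须大于0'
--     idx = -1
--     for _ in range(idx_occurrence):
--         idx = text.find(substring, idx + 1)
--         if idx == -1:
--             return text
--     return text[:idx]
-- ===== SOURCE B (Python) =====
-- def truncate_to_substring(text, substring, idx_occurrence):
--     # single left-to-right scan with a match counter instead of repeated find()
--     assert idx_occurrence > 0, 'idx_occurrence必须大于0'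
--     count = 0
--     for p in range(len(text) + 1):
--         if text.startswith(substring, p):
--             count += 1
--             if count == idx_occurrence:
--                 return text[:p]
--     return text
-- ===== Notes on version B (the rewrite author's own statement) =====
-- stated objective: alternative
-- what changed: Replaced the repeated text.find(substring, idx+1) jump loop with a single left-to-right scan over all positions that tests startswith at each position and counts matches until the nth.
import Mathlib
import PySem

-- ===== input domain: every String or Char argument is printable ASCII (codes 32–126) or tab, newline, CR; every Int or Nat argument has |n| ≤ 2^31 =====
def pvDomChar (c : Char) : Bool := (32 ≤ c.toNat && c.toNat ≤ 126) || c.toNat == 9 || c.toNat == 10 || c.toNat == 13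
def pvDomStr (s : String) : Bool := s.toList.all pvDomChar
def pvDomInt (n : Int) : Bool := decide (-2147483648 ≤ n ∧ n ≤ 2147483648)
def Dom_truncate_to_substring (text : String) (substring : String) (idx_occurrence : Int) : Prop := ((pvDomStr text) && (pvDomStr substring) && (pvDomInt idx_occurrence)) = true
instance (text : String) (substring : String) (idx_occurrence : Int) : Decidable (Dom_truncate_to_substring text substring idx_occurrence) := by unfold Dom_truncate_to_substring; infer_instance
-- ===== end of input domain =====

-- B replaces A's repeated text.find jumps with one left-to-right scan that counts matches (alternative decomposition, same result).

-- ===== PORT A =====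
-- the 'for _ in range(idx_occurrence)' loop: fuel = remaining iterations, idx = current find position
def pvALoop (text : String) (substring : String) : Nat → Int → String
  | 0, idx => PySem.Str.slice text none (some idx)      -- loop exhausted: return text[:idx]
  | m + 1, idx =>
      let i := PySem.Str.findFrom text substring (idx + 1) none   -- text.find(substring, idx + 1)
      if i = -1 then text else pvALoop text substring m i

def truncate_to_substring (text : String) (substring : String) (idx_occurrence : Int) : String :=
  -- assert idx_occurrence > 0 (raises for ≤ 0: excluded by Pre_); idx = -1
  pvALoop text substring idx_occurrence.toNat (-1)

-- ===== PORT B =====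
-- scan p over range(len(text)+1), counting matches; 'text.startswith(substring, p)' is
-- Chars.startswith on (toList.drop p) — exact since 0 ≤ p ≤ len(text)
def pvBLoop (text : String) (substring : String) (n : Int) : List Nat → Int → String
  | [], _ => text
  | p :: ps, count =>
      if PySem.Chars.startswith (text.toList.drop p) substring.toList then
        if count + 1 = n then PySem.Str.slice text none (some (p : Int))   -- text[:p]
        else pvBLoop text substring n ps (count + 1)
      else pvBLoop text substring n ps count

def truncate_to_substring_alt (text : String) (substring : String) (idx_occurrence : Int) : String :=
  pvBLoop text substring idx_occurrence (List.range (text.toList.length + 1)) 0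

-- ===== PRECONDITION & SPEC =====
-- A's assert raises AssertionError for idx_occurrence ≤ 0; exactly those inputs are excluded.
def Pre_truncate_to_substring (text : String) (substring : String) (idx_occurrence : Int) : Prop :=
  0 < idx_occurrence
instance (text : String) (substring : String) (idx_occurrence : Int) : Decidable (Pre_truncate_to_substring text substring idx_occurrence) := by unfold Pre_truncate_to_substring; infer_instance

def pvWitness_truncate_to_substring : String × String × Int := ("abcabcab", "ab", 2)

def Spec_truncate_to_substring (text : String) (substring : String) (idx_occurrence : Int) (out : String) : Prop := out = truncate_to_substring_alt text substring idx_occurrence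
instance (text : String) (substring : String) (idx_occurrence : Int) (out : String) : Decidable (Spec_truncate_to_substring text substring idx_occurrence out) := by unfold Spec_truncate_to_substring; infer_instance

-- ===== CLAIM (what is proved, stated in full; the proofs are below) =====
def Claim_equal_truncate_to_substring : Prop := ∀ (text : String) (substring : String) (idx_occurrence : Int), Dom_truncate_to_substring text substring idx_occurrence → Pre_truncate_to_substring text substring idx_occurrence → Spec_truncate_to_substring text substring idx_occurrence (truncate_to_substring text substring idx_occurrence)

-- ===== LEMMAS AND PROOFS =====

-- find(substring, start) past the end of the string is -1 (CPython quirk, kept by PySem)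
theorem pv_findFrom_past (s sub : List Char) :
    PySem.Chars.findFrom s sub ((s.length : Int) + 1) none = -1 := by
  simp [PySem.Chars.findFrom]
  omega

-- an infix of (drop k s) is a prefix at some position j ≥ k
theorem pv_infix_drop_iff (s sub : List Char) (k : Nat) :
    sub <:+: s.drop k ↔ ∃ j, k ≤ j ∧ sub <+: s.drop j := by
  constructor
  · intro h
    have h1 : (∃ j, sub <+: (s.drop k).drop j) := by
      rw [PySem.Chars.exists_prefix_drop_iff_isIn, PySem.Chars.isIn_iff_infix]; exact h
    obtain ⟨j, hj⟩ := h1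
    exact ⟨k + j, by omega, by simpa [List.drop_drop, Nat.add_comm] using hj⟩
  · rintro ⟨j, hkj, hj⟩
    have : sub <+: (s.drop k).drop (j - k) := by
      rw [List.drop_drop, show k + (j - k) = j by omega]
      exact hj
    rw [← PySem.Chars.isIn_iff_infix, ← PySem.Chars.exists_prefix_drop_iff_isIn]
    exact ⟨j - k, this⟩

-- uniqueness: the first match position ≥ k characterises findFrom
theorem pv_findFrom_eq_of (s sub : List Char) (k i : Nat) (hk : k ≤ s.length)
    (hki : k ≤ i) (hpre : sub <+: s.drop i)
    (hmin : ∀ j, k ≤ j → j < i → ¬ sub <+: s.drop j) :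
    PySem.Chars.findFrom s sub (k : Int) none = (i : Int) := by
  have hne : PySem.Chars.findFrom s sub (k : Int) none ≠ -1 := by
    intro hcon
    rw [PySem.Chars.findFrom_natCast_eq_neg_one_iff s sub k hk] at hcon
    exact hcon ((pv_infix_drop_iff s sub k).2 ⟨i, hki, hpre⟩)
  obtain ⟨hge, hp, hm⟩ := PySem.Chars.findFrom_natCast_spec s sub k hk hne
  set f := PySem.Chars.findFrom s sub (k : Int) none with hf
  have hf0 : 0 ≤ f := le_trans (by exact_mod_cast Int.ofNat_nonneg k) hge
  have hkf : k ≤ f.toNat := by omega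
  rcases lt_trichotomy f.toNat i with h | h | h
  · exact absurd hp (hmin f.toNat hkf h)
  · omega
  · exact absurd hpre (hm i hki h)

-- one scan step: find from k either hits k or equals find from k+1
theorem pv_ff_cons (s sub : List Char) (k : Nat) (hk : k ≤ s.length) :
    PySem.Chars.findFrom s sub (k : Int) none =
      if sub <+: s.drop k then (k : Int)
      else PySem.Chars.findFrom s sub ((k : Int) + 1) none := by
  split_ifs with hpre
  · exact pv_findFrom_eq_of s sub k k hk le_rfl hpre (by omega)
  · by_cases hk1 : k = s.length
    · subst hk1
      rw [pv_findFrom_past]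
      rw [PySem.Chars.findFrom_natCast_eq_neg_one_iff s sub _ le_rfl]
      intro hcon
      obtain ⟨j, _, hj⟩ := (pv_infix_drop_iff s sub _).1 hcon
      rw [List.drop_eq_nil_of_le (by omega)] at hj
      rw [List.drop_eq_nil_of_le (le_refl s.length)] at hpre
      exact hpre (by simpa using hj)
    · have hk1' : k + 1 ≤ s.length := by omega
      have hcast : ((k : Int) + 1) = ((k + 1 : Nat) : Int) := by push_cast; ring
      rw [hcast]
      by_cases hf : PySem.Chars.findFrom s sub ((k + 1 : Nat) : Int) none = -1
      · rw [hf]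
        rw [PySem.Chars.findFrom_natCast_eq_neg_one_iff s sub k hk]
        rw [PySem.Chars.findFrom_natCast_eq_neg_one_iff s sub (k+1) hk1'] at hf
        intro hcon
        obtain ⟨j, hkj, hj⟩ := (pv_infix_drop_iff s sub k).1 hcon
        have : k + 1 ≤ j := by
          rcases Nat.eq_or_lt_of_le hkj with h | h
          · exact absurd (h ▸ hj) hpre
          · omega
        exact hf ((pv_infix_drop_iff s sub (k+1)).2 ⟨j, this, hj⟩)
      · obtain ⟨hge, hp, hm⟩ := PySem.Chars.findFrom_natCast_spec s sub (k+1) hk1' hf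
        set f := PySem.Chars.findFrom s sub ((k + 1 : Nat) : Int) none with hfdef
        have hf0 : 0 ≤ f := le_trans (by exact_mod_cast Int.ofNat_nonneg (k+1)) hge
        have := pv_findFrom_eq_of s sub k f.toNat hk (by omega) hp
          (fun j hkj hjf => by
            rcases Nat.eq_or_lt_of_le hkj with h | h
            · exact h ▸ hpre
            · exact hm j h hjf)
        omega

-- the core loop correspondence: A's find-jump loop with m+1 iterations left and next
-- search start s equals B's position scan from s with (m+1) matches still needed
theorem pv_loop_eq (text substring : String) (n : Int) :
    ∀ (t s : Nat) (m : Nat), s + t = text.toList.length + 1 →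
      pvALoop text substring (m + 1) ((s : Int) - 1) =
        pvBLoop text substring n (List.range' s t) (n - (m + 1)) := by
  intro t
  induction t with
  | zero =>
    intro s m hs
    have hs' : s = text.toList.length + 1 := by omega
    have h1 : ((s : Int) - 1) + 1 = (text.toList.length : Int) + 1 := by
      subst hs'; push_cast; ring
    have hpast : PySem.Chars.findFrom text.toList substring.toList ((text.length : Int) + 1) none = -1 := by
      simpa using pv_findFrom_past text.toList substring.toList
    simp [pvALoop, pvBLoop, List.range'_zero, h1, PySem.Str.findFrom_eq, hpast]
  | succ t ih =>
    intro s m hs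
    have hsl : s ≤ text.toList.length := by omega
    have h1 : ((s : Int) - 1) + 1 = (s : Int) := by ring
    rw [List.range'_succ]
    simp only [pvALoop, pvBLoop, h1, PySem.Str.findFrom_eq]
    rw [pv_ff_cons text.toList substring.toList s hsl]
    by_cases hpre : substring.toList <+: text.toList.drop s
    · rw [if_pos hpre, if_pos ((PySem.Chars.startswith_iff _ _).2 hpre)]
      have hsne : (s : Int) ≠ -1 := by omega
      rw [if_neg hsne]
      cases m with
      | zero =>
        have : n - (0 + 1 : Nat) + 1 = n := by push_cast; ring
        rw [if_pos (by push_cast; ring)]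
        simp [pvALoop]
      | succ k =>
        rw [if_neg (by push_cast; omega)]
        have hrec := ih (s + 1) k (by omega)
        have hcast : ((s + 1 : Nat) : Int) - 1 = (s : Int) := by push_cast; ring
        rw [hcast] at hrec
        rw [hrec]
        congr 1
        push_cast; ring
    · have hsw : ¬ (PySem.Chars.startswith (text.toList.drop s) substring.toList = true) :=
        fun h => hpre ((PySem.Chars.startswith_iff _ _).1 h)
      rw [if_neg hpre, if_neg hsw]
      have hrec := ih (s + 1) m (by omega)
      rw [show ((s + 1 : Nat) : Int) - 1 = (s : Int) by push_cast; ring] at hrec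
      simp only [pvALoop, PySem.Str.findFrom_eq] at hrec
      exact hrec

-- ===== VERDICT (by name: the statement is the Claim_ definition above) =====
theorem truncate_to_substring_spec : Claim_equal_truncate_to_substring := by
  intro text substring idx_occurrence _ hpre
  unfold Spec_truncate_to_substring truncate_to_substring truncate_to_substring_alt
  have hpos : 0 < idx_occurrence := hpre
  obtain ⟨m, hm⟩ : ∃ m, idx_occurrence.toNat = m + 1 :=
    ⟨idx_occurrence.toNat - 1, by omega⟩
  rw [hm, List.range_eq_range']
  have := pv_loop_eq text substring idx_occurrence (text.toList.length + 1) 0 m (by omega)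
  simpa [hm, show ((0 : Nat) : Int) - 1 = -1 by ring,
    show idx_occurrence - ((m : Int) + 1) = 0 by omega] using this
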